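-- pv_equiv track=rewrite | github.com/nisargsheth/Mini-Wikipedia-Search-Engine | Phase2/search.py | parse_field_query
-- ===== SOURCE A (Python) =====
-- def parse_field_query(query):
--     query_split = query.split(' ')
--     query_str = []
--     curr = ""
--     for word in query_split:
--         if(word.startswith("t:") or word.startswith("r:") or word.startswith("e:") or word.startswith("b:") or word.startswith("i:") or word.startswith("c:")):
--             if(len(curr) > 0):
--                 query_str.append([curr[0], curr[2:]])
--             curr = ""
--             curr += word + " "
--         else:
--             curr += word + " "
--     if(curr!=""):
--         query_str.append([curr[0], curr[2:]])
--     return query_str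
-- ===== SOURCE B (Python) =====
-- def parse_field_query(query):
--     words = query.split(' ')
--     cuts = [i for i, w in enumerate(words) if w[:2] in ("t:", "r:", "e:", "b:", "i:", "c:")]
--     if not cuts or cuts[0] != 0:
--         cuts = [0] + cuts
--     out = []
--     for start, end in zip(cuts, cuts[1:] + [len(words)]):
--         seg = ' '.join(words[start:end]) + ' '
--         out.append([seg[0], seg[2:]])
--     return out
-- ===== Notes on version B (the rewrite author's own statement) =====
-- stated objective: alternative
-- what changed: B computes the cut positions (indices of field-tagged words, with 0 prepended) with enumerate, then slices the word list between consecutive cuts and formats each slice, instead of A's single left-to-right pass over a running string accumulator with inline flushes.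
import Mathlib
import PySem

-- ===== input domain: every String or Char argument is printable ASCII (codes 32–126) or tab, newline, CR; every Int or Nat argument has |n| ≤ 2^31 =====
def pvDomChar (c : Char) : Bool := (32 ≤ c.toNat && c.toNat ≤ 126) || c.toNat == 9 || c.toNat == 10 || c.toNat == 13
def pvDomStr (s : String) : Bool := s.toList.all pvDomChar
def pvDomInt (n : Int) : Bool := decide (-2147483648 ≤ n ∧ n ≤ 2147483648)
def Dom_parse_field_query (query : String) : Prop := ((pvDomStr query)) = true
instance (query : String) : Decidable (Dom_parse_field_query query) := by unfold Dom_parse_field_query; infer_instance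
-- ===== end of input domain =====

-- B parses by computing the cut positions (indices of field-tagged words, 0 prepended)
-- and slicing the word list between consecutive cuts, instead of A's single
-- left-to-right pass over a running string accumulator with inline flushes (alternative).

-- ===== PORT A =====
-- word.startswith("t:") or … or word.startswith("c:")
def pfqIsTag (w : List Char) : Bool :=
  PySem.Chars.startswith w ['t', ':'] || PySem.Chars.startswith w ['r', ':'] ||
  PySem.Chars.startswith w ['e', ':'] || PySem.Chars.startswith w ['b', ':'] ||
  PySem.Chars.startswith w ['i', ':'] || PySem.Chars.startswith w ['c', ':']

-- [curr[0], curr[2:]] ; only used under A's guards len(curr) > 0 / curr != "", where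
-- Python's curr[0] (a one-char string) is exactly String.ofList (curr.take 1); curr[2:] is drop 2.
def pfqEmit (curr : List Char) : List String :=
  [String.ofList (curr.take 1), String.ofList (curr.drop 2)]

def pfqStepA (st : List (List String) × List Char) (word : List Char) :
    List (List String) × List Char :=
  if pfqIsTag word then
    ((if st.2.length > 0 then st.1 ++ [pfqEmit st.2] else st.1), word ++ [' '])
  else (st.1, st.2 ++ word ++ [' '])

def parse_field_query (query : String) : List (List String) :=
  let query_split := PySem.Chars.splitOn query.toList [' ']
  let st := query_split.foldl pfqStepA ([], [])
  if st.2 ≠ [] then st.1 ++ [pfqEmit st.2] else st.1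

-- ===== PORT B =====
-- w[:2] in ("t:", "r:", "e:", "b:", "i:", "c:")
def pfqIsTag2 (w : List Char) : Bool :=
  [['t', ':'], ['r', ':'], ['e', ':'], ['b', ':'], ['i', ':'], ['c', ':']].contains
    (PySem.List.slice w none (some 2))

def parse_field_query_alt (query : String) : List (List String) :=
  let words := PySem.Chars.splitOn query.toList [' ']
  let cuts0 := ((PySem.List.enumerate words 0).filter (fun p => pfqIsTag2 p.2)).map (·.1)
  let cuts := if cuts0 = [] ∨ cuts0.head? ≠ some 0 then 0 :: cuts0 else cuts0
  (cuts.zip (PySem.List.slice cuts (some 1) none ++ [(words.length : Int)])).map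
    (fun p =>
      let seg := PySem.Chars.join [' '] (PySem.List.slice words (some p.1) (some p.2)) ++ [' ']
      [String.ofList (seg.take 1), String.ofList (seg.drop 2)])

-- ===== PRECONDITION & SPEC =====
def Spec_parse_field_query (query : String) (out : List (List String)) : Prop := out = parse_field_query_alt query
instance (query : String) (out : List (List String)) : Decidable (Spec_parse_field_query query out) := by unfold Spec_parse_field_query; infer_instance

-- ===== CLAIM (what is proved, stated in full; the proofs are below) =====
def Claim_equal_parse_field_query : Prop := ∀ (query : String), Dom_parse_field_query query → Spec_parse_field_query query (parse_field_query query)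

-- ===== LEMMAS AND PROOFS =====

theorem pfq_splitOn_ne_nil (s : List Char) : PySem.Chars.splitOn s [' '] ≠ [] := by
  have h : ∀ fuel s cur acc, PySem.Chars.splitOn.go [' '] fuel s cur (acc : List (List Char)) ≠ [] := by
    intro fuel
    induction fuel with
    | zero => intro s cur acc; simp [PySem.Chars.splitOn.go]
    | succ n ih =>
      intro s cur acc
      rw [PySem.Chars.splitOn.go.eq_def]
      split <;> try simp
      rename_i fuel c rest heq
      obtain rfl : fuel = n := by omega
      split <;> apply ih
  simp [PySem.Chars.splitOn]; apply h

theorem pfqIsTag2_eq (w : List Char) : pfqIsTag2 w = pfqIsTag w := by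
  match w with
  | [] => decide
  | [a] => simp [pfqIsTag2, pfqIsTag, PySem.Chars.startswith, PySem.List.slice, List.isPrefixOf]
  | a :: b :: r =>
    simp only [pfqIsTag2, pfqIsTag, PySem.Chars.startswith, PySem.List.slice, List.isPrefixOf,
      List.contains_eq_mem, List.mem_cons, List.not_mem_nil, or_false]
    by_cases h1 : b = ':'
    · subst h1
      simp only [Bool.beq_eq_decide_eq]
      simp
      simp only [eq_comm, Bool.or_assoc]
    · simp [h1, Ne.symm h1]

-- A's result, characterised as a fold building the group list (proof-side only).
def pfqAppendLast (gs : List (List (List Char))) (w : List Char) : List (List (List Char)) :=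
  match gs with
  | [] => [[w]]
  | [g] => [g ++ [w]]
  | g :: rest => g :: pfqAppendLast rest w

def pfqStepB (gs : List (List (List Char))) (w : List Char) : List (List (List Char)) :=
  if pfqIsTag w || gs.isEmpty then gs ++ [[w]] else pfqAppendLast gs w

-- A's running string for the group of words g: each word followed by one space.
def pfqFlat (g : List (List Char)) : List Char := (g.map (fun w => w ++ [' '])).flatten

-- B's formatted row for a group g.
def pfqEmitG (g : List (List Char)) : List String :=
  [String.ofList ((PySem.Chars.join [' '] g ++ [' ']).take 1),
   String.ofList ((PySem.Chars.join [' '] g ++ [' ']).drop 2)]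

theorem pfqFlat_ne_nil (g : List (List Char)) (h : g ≠ []) : pfqFlat g ≠ [] := by
  cases g with
  | nil => exact absurd rfl h
  | cons w g' => simp [pfqFlat]

theorem pfqFlat_eq_join (g : List (List Char)) (h : g ≠ []) :
    pfqFlat g = PySem.Chars.join [' '] g ++ [' '] := by
  induction g with
  | nil => exact absurd rfl h
  | cons w g' ih =>
    cases g' with
    | nil => simp [pfqFlat, PySem.Chars.join_singleton]
    | cons q rest =>
      rw [PySem.Chars.join_cons_cons]
      have := ih (by simp)
      simp only [pfqFlat, List.map_cons, List.flatten_cons] at this ⊢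
      rw [this]; simp

theorem pfqEmit_flat (g : List (List Char)) (h : g ≠ []) :
    pfqEmit (pfqFlat g) = pfqEmitG g := by
  simp [pfqEmit, pfqEmitG, pfqFlat_eq_join g h]

theorem pfqAppendLast_append (gs : List (List (List Char))) (g : List (List Char))
    (w : List Char) : pfqAppendLast (gs ++ [g]) w = gs ++ [g ++ [w]] := by
  induction gs with
  | nil => rfl
  | cons a gs ih =>
    cases gs with
    | nil => rfl
    | cons b gs => simpa [pfqAppendLast] using ih

-- The relation between A's state and the group list.
def pfqInv (st : List (List String) × List Char) (gs : List (List (List Char))) : Prop :=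
  (gs = [] ∧ st = ([], [])) ∨
  (∃ gs' g, g ≠ [] ∧ gs = gs' ++ [g] ∧ st.1 = gs'.map pfqEmitG ∧ st.2 = pfqFlat g)

theorem pfqInv_step (st : List (List String) × List Char) (gs : List (List (List Char)))
    (w : List Char) (h : pfqInv st gs) : pfqInv (pfqStepA st w) (pfqStepB gs w) := by
  rcases h with ⟨hgs, hst⟩ | ⟨gs', g, hg, hgs, h1, h2⟩
  · subst hgs hst
    right
    refine ⟨[], [w], by simp, by simp [pfqStepB], ?_⟩
    by_cases ht : pfqIsTag w <;> simp [pfqStepA, pfqFlat, ht]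
  · subst hgs
    have hne : pfqFlat g ≠ [] := pfqFlat_ne_nil g hg
    by_cases ht : pfqIsTag w
    · right
      refine ⟨gs' ++ [g], [w], by simp, by simp [pfqStepB, ht], ?_, ?_⟩
      · simp [pfqStepA, ht, h1, h2, pfqEmit_flat g hg, hne]
      · simp [pfqStepA, ht, pfqFlat]
    · right
      refine ⟨gs', g ++ [w], by simp, ?_, ?_, ?_⟩
      · simp [pfqStepB, ht, pfqAppendLast_append]
      · simp [pfqStepA, ht, h1]
      · simp [pfqStepA, ht, h2, pfqFlat]

theorem pfqInv_finish (st : List (List String) × List Char) (gs : List (List (List Char)))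
    (h : pfqInv st gs) :
    (if st.2 ≠ [] then st.1 ++ [pfqEmit st.2] else st.1) = gs.map pfqEmitG := by
  rcases h with ⟨hgs, hst⟩ | ⟨gs', g, hg, hgs, h1, h2⟩
  · subst hgs hst; simp
  · subst hgs
    simp [h1, h2, pfqEmit_flat g hg, pfqFlat_ne_nil g hg]

theorem pfqInv_foldl (ws : List (List Char)) (st : List (List String) × List Char)
    (gs : List (List (List Char))) (h : pfqInv st gs) :
    pfqInv (ws.foldl pfqStepA st) (ws.foldl pfqStepB gs) := by
  induction ws generalizing st gs with
  | nil => exact h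
  | cons w ws ih => exact ih _ _ (pfqInv_step st gs w h)

-- B's cut list and slices, named for the proofs.
def pfqCuts0 (ws : List (List Char)) : List Int :=
  ((PySem.List.enumerate ws 0).filter (fun p => pfqIsTag p.2)).map (·.1)

def pfqCuts (ws : List (List Char)) : List Int :=
  if pfqCuts0 ws = [] ∨ (pfqCuts0 ws).head? ≠ some 0 then 0 :: pfqCuts0 ws else pfqCuts0 ws

def pfqBounds (ws : List (List Char)) : List (Int × Int) :=
  (pfqCuts ws).zip ((pfqCuts ws).tail ++ [(ws.length : Int)])

def pfqSlices (ws : List (List Char)) : List (List (List Char)) :=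
  (pfqBounds ws).map (fun p => PySem.List.slice ws (some p.1) (some p.2))

theorem pfq_mem_cuts0 (ws : List (List Char)) (x : Int) (hx : x ∈ pfqCuts0 ws) :
    ∃ k : Nat, x = (k : Int) ∧ k < ws.length := by
  simp only [pfqCuts0, List.mem_map, List.mem_filter] at hx
  obtain ⟨p, ⟨hp, -⟩, rfl⟩ := hx
  rw [PySem.List.mem_enumerate_iff] at hp
  obtain ⟨k, hk, rfl⟩ := hp
  exact ⟨k, by simp, hk⟩

theorem pfqCuts_ne_nil (ws : List (List Char)) : pfqCuts ws ≠ [] := by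
  unfold pfqCuts; split
  · simp
  · rename_i h; rw [not_or] at h; exact h.1

theorem pfq_mem_cuts (ws : List (List Char)) (x : Int) (hx : x ∈ pfqCuts ws) :
    ∃ k : Nat, x = (k : Int) ∧ k ≤ ws.length := by
  unfold pfqCuts at hx
  have h0 : ∀ y ∈ pfqCuts0 ws, ∃ k : Nat, y = (k : Int) ∧ k ≤ ws.length := by
    intro y hy
    obtain ⟨k, rfl, hk⟩ := pfq_mem_cuts0 ws y hy
    exact ⟨k, rfl, Nat.le_of_lt hk⟩
  split at hx
  · rcases List.mem_cons.mp hx with rfl | hx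
    · exact ⟨0, by simp⟩
    · exact h0 x hx
  · exact h0 x hx

theorem pfqCuts0_concat (ws : List (List Char)) (w : List Char) :
    pfqCuts0 (ws ++ [w]) = pfqCuts0 ws ++ (if pfqIsTag w then [(ws.length : Int)] else []) := by
  unfold pfqCuts0
  rw [PySem.List.enumerate_append, List.filter_append, List.map_append]
  congr 1
  by_cases ht : pfqIsTag w <;>
    simp [PySem.List.enumerate_cons, PySem.List.enumerate_nil, ht]

theorem pfqCuts_concat (ws : List (List Char)) (w : List Char) (hne : ws ≠ []) :
    pfqCuts (ws ++ [w]) = pfqCuts ws ++ (if pfqIsTag w then [(ws.length : Int)] else []) := by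
  rw [pfqCuts, pfqCuts, pfqCuts0_concat]
  by_cases ht : pfqIsTag w
  · simp only [ht, if_true]
    cases h0 : pfqCuts0 ws with
    | nil =>
      simpa using hne
    | cons y rest =>
      by_cases hy : y = 0
      · subst hy; simp
      · simp [hy]
  · simp [ht]

theorem pfq_zip_concat (c : List Int) (x L : Int) :
    (c ++ [x]).zip ((c ++ [x]).tail ++ [L]) = c.zip (c.tail ++ [x]) ++ [(x, L)] := by
  cases c with
  | nil => rfl
  | cons a c' =>
    have hlen : (a :: c').length = ((a :: c').tail ++ [x]).length := by simp
    have h1 : ((a :: c') ++ [x]).tail = (a :: c').tail ++ [x] := by simp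
    rw [h1, List.zip_append hlen]
    simp

theorem pfq_slice_frozen (ws : List (List Char)) (w : List Char) (s e : Nat)
    (he : e ≤ ws.length) :
    PySem.List.slice (ws ++ [w]) (some (s : Int)) (some (e : Int)) =
    PySem.List.slice ws (some (s : Int)) (some (e : Int)) := by
  rw [PySem.List.slice_natCast, PySem.List.slice_natCast]
  by_cases hs : s ≤ ws.length
  · rw [List.drop_append_of_le_length hs, List.take_append_of_le_length (by simp; omega)]
  · rw [List.drop_of_length_le (le_of_not_ge hs), List.drop_eq_nil_iff.mpr (by simp; omega)]

theorem pfq_slice_new (ws : List (List Char)) (w : List Char) :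
    PySem.List.slice (ws ++ [w]) (some (ws.length : Int)) (some ((ws.length + 1 : Nat) : Int)) = [w] := by
  rw [PySem.List.slice_natCast]
  simp

theorem pfq_slice_extend (ws : List (List Char)) (w : List Char) (s : Nat)
    (hs : s ≤ ws.length) :
    PySem.List.slice (ws ++ [w]) (some (s : Int)) (some ((ws.length + 1 : Nat) : Int)) =
    PySem.List.slice ws (some (s : Int)) (some (ws.length : Int)) ++ [w] := by
  rw [PySem.List.slice_natCast, PySem.List.slice_natCast]
  rw [List.drop_append_of_le_length hs]
  rw [List.take_of_length_le (by simp; try omega), List.take_of_length_le (by simp; try omega)]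

theorem pfq_map_frozen (ws : List (List Char)) (w : List Char) (ps : List (Int × Int))
    (h : ∀ p ∈ ps, (∃ k : Nat, p.1 = (k : Int)) ∧ ∃ e : Nat, p.2 = (e : Int) ∧ e ≤ ws.length) :
    ps.map (fun p => PySem.List.slice (ws ++ [w]) (some p.1) (some p.2)) =
    ps.map (fun p => PySem.List.slice ws (some p.1) (some p.2)) := by
  apply List.map_congr_left
  intro p hp
  obtain ⟨⟨k, h1⟩, e, h2, he⟩ := h p hp
  rw [h1, h2, pfq_slice_frozen ws w k e he]

theorem pfq_slices_singleton (w : List Char) : pfqSlices [w] = [[w]] := by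
  have h0 : pfqCuts0 [w] = if pfqIsTag w then [(0 : Int)] else [] := by
    unfold pfqCuts0
    by_cases ht : pfqIsTag w <;>
      simp [PySem.List.enumerate_cons, PySem.List.enumerate_nil, ht]
  have hc : pfqCuts [w] = [0] := by
    unfold pfqCuts
    rw [h0]
    by_cases ht : pfqIsTag w <;> simp [ht]
  unfold pfqSlices pfqBounds
  rw [hc]
  simp [PySem.List.slice_to]

theorem pfq_slices_eq_fold (ws : List (List Char)) (hne : ws ≠ []) :
    pfqSlices ws = ws.foldl pfqStepB [] := by
  induction ws using List.reverseRecOn with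
  | nil => exact absurd rfl hne
  | append_singleton ws w ih =>
    by_cases hws : ws = []
    · subst hws
      simpa [pfqStepB] using pfq_slices_singleton w
    · have hcuts := pfqCuts_concat ws w hws
      have hfold : (ws ++ [w]).foldl pfqStepB [] = pfqStepB (ws.foldl pfqStepB []) w := by
        rw [List.foldl_append]; rfl
      have ihw := ih hws
      have hlen : (((ws ++ [w]).length : Nat) : Int) = ((ws.length + 1 : Nat) : Int) := by simp
      by_cases ht : pfqIsTag w
      · -- a tagged word starts a fresh one-word group / a fresh cut
        have hc : pfqCuts (ws ++ [w]) = pfqCuts ws ++ [(ws.length : Int)] := by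
          rw [hcuts]; simp [ht]
        have hb : pfqBounds (ws ++ [w]) =
            pfqBounds ws ++ [((ws.length : Int), ((ws.length + 1 : Nat) : Int))] := by
          unfold pfqBounds
          rw [hc, hlen, pfq_zip_concat]
        unfold pfqSlices
        rw [hb, List.map_append, pfq_map_frozen ws w _ ?memb]
        case memb =>
          intro p hp
          obtain ⟨h1, h2⟩ := List.of_mem_zip hp
          constructor
          · obtain ⟨k, hk, -⟩ := pfq_mem_cuts ws p.1 h1
            exact ⟨k, hk⟩
          · rcases List.mem_append.mp h2 with h2 | h2
            · obtain ⟨e, hk, hle⟩ := pfq_mem_cuts ws p.2 (List.mem_of_mem_tail h2)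
              exact ⟨e, hk, hle⟩
            · exact ⟨ws.length, by simpa using h2, le_refl _⟩
        rw [show (pfqBounds ws).map (fun p => PySem.List.slice ws (some p.1) (some p.2)) =
              pfqSlices ws from rfl, ihw, hfold]
        have hnew := pfq_slice_new ws w
        push_cast at hnew ⊢
        simp [pfqStepB, ht, hnew]
      · -- an untagged word joins the last group / leaves the cuts unchanged
        have hc : pfqCuts (ws ++ [w]) = pfqCuts ws := by rw [hcuts]; simp [ht]
        obtain ⟨c, x, hcx⟩ := (List.eq_nil_or_concat (pfqCuts ws)).resolve_left (pfqCuts_ne_nil ws)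
        rw [List.concat_eq_append] at hcx
        have hxmem : x ∈ pfqCuts ws := by rw [hcx]; simp
        obtain ⟨k, hk, hkle⟩ := pfq_mem_cuts ws x hxmem
        have hbw : pfqBounds ws = c.zip (c.tail ++ [x]) ++ [(x, (ws.length : Int))] := by
          unfold pfqBounds
          rw [hcx, pfq_zip_concat]
        have hb : pfqBounds (ws ++ [w]) =
            c.zip (c.tail ++ [x]) ++ [(x, ((ws.length + 1 : Nat) : Int))] := by
          unfold pfqBounds
          rw [hc, hcx, hlen, pfq_zip_concat]
        have hmemc : ∀ p ∈ c.zip (c.tail ++ [x]),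
            (∃ k : Nat, p.1 = (k : Int)) ∧ ∃ e : Nat, p.2 = (e : Int) ∧ e ≤ ws.length := by
          intro p hp
          obtain ⟨h1, h2⟩ := List.of_mem_zip hp
          have h1' : p.1 ∈ pfqCuts ws := by rw [hcx]; exact List.mem_append_left _ h1
          have h2' : p.2 ∈ pfqCuts ws := by
            rw [hcx]
            rcases List.mem_append.mp h2 with h2 | h2
            · exact List.mem_append_left _ (List.mem_of_mem_tail h2)
            · exact List.mem_append_right _ h2
          constructor
          · obtain ⟨k', hk', -⟩ := pfq_mem_cuts ws p.1 h1'
            exact ⟨k', hk'⟩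
          · obtain ⟨e, he, hle⟩ := pfq_mem_cuts ws p.2 h2'
            exact ⟨e, he, hle⟩
        have hgs : ws.foldl pfqStepB [] =
            ((c.zip (c.tail ++ [x])).map (fun p => PySem.List.slice ws (some p.1) (some p.2))) ++
              [PySem.List.slice ws (some x) (some (ws.length : Int))] := by
          rw [← ihw]
          unfold pfqSlices
          rw [hbw, List.map_append]
          rfl
        unfold pfqSlices
        rw [hb, List.map_append, pfq_map_frozen ws w _ hmemc, hfold, hgs]
        simp only [List.map_cons, List.map_nil]
        rw [hk, pfq_slice_extend ws w k hkle, pfqStepB, if_neg (by simp [ht]),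
          pfqAppendLast_append]

theorem pfq_alt_eq (query : String) :
    parse_field_query_alt query =
    (pfqSlices (PySem.Chars.splitOn query.toList [' '])).map pfqEmitG := by
  simp only [parse_field_query_alt, pfqSlices, pfqBounds, pfqCuts, pfqCuts0,
    pfqIsTag2_eq, PySem.List.slice_from_one, List.map_map]
  rfl

-- ===== VERDICT (by name: the statement is the Claim_ definition above) =====
theorem parse_field_query_spec : Claim_equal_parse_field_query := by
  intro query _
  unfold Spec_parse_field_query
  rw [pfq_alt_eq, pfq_slices_eq_fold _ (pfq_splitOn_ne_nil _)]
  unfold parse_field_query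
  have h := pfqInv_foldl (PySem.Chars.splitOn query.toList [' ']) ([], []) []
    (Or.inl ⟨rfl, rfl⟩)
  simpa using pfqInv_finish _ _ h
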